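-- pv_equiv track=rewrite | github.com/EduardoSRTolentino/TTV-Sistema-Torneios | backend/app/services/group_service.py | snake_assign
-- ===== SOURCE A (Python) =====
-- from typing import Dict, List, Optional, Sequence, Tuple
--
-- def snake_assign(reg_ids_ordered: Sequence[int], num_groups: int) -> List[List[int]]:
--     groups: List[List[int]] = [[] for _ in range(num_groups)]
--     idx = 0
--     row = 0
--     reg_ids_ordered = list(reg_ids_ordered)
--     while idx < len(reg_ids_ordered):
--         order = range(num_groups) if row % 2 == 0 else range(num_groups - 1, -1, -1)
--         for g in order:
--             if idx < len(reg_ids_ordered):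
--                 groups[g].append(reg_ids_ordered[idx])
--                 idx += 1
--         row += 1
--     return groups
-- ===== SOURCE B (Python) =====
-- from typing import List, Sequence
--
--
-- def snake_assign(reg_ids_ordered: Sequence[int], num_groups: int) -> List[List[int]]:
--     groups: List[List[int]] = [[] for _ in range(num_groups)]
--     for i, x in enumerate(list(reg_ids_ordered)):
--         row, pos = divmod(i, num_groups)
--         target = pos if row % 2 == 0 else num_groups - 1 - pos
--         groups[target].append(x)
--     return groups
-- ===== Notes on version B (the rewrite author's own statement) =====
-- stated objective: simpler
-- what changed: Replaces A's direction-toggling row-by-row while/for scan (mutable idx and row counters) with a single enumerate pass that computes each element's serpentine column arithmetically via divmod(i, num_groups).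
import Mathlib
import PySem

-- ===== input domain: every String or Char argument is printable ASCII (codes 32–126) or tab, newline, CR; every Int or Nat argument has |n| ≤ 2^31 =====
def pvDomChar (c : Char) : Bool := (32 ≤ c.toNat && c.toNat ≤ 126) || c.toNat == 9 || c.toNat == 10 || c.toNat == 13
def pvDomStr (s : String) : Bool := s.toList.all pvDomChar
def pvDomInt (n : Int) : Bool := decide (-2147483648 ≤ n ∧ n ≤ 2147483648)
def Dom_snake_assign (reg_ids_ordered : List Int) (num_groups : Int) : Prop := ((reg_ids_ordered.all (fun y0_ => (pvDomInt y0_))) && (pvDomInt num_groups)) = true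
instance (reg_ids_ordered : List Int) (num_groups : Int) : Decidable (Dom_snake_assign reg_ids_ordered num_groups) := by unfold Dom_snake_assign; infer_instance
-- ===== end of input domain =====

-- B computes each element's serpentine column arithmetically (divmod) in one enumerate pass
-- instead of A's direction-toggling row-by-row scan; objective: simpler.

-- ===== PORT A =====
-- one step of A's inner 'for g in order' loop; state = (groups, idx)
def pvAStep (xs : List Int) (st : List (List Int) × Nat) (g : Int) : List (List Int) × Nat :=
  if st.2 < xs.length then
    (st.1.set g.toNat ((st.1.getD g.toNat []) ++ [xs.getD st.2 0]), st.2 + 1)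
  else st

-- A's 'while idx < len' loop; fuel only makes the recursion total: with 0 < n one outer
-- iteration consumes ≥ 1 element, so fuel = xs.length never runs out (fuel = 0 is exactly
-- where the Python loops forever, outside Pre_).
def pvAOuter (xs : List Int) (n : Int) : Nat → List (List Int) → Nat → Int → List (List Int)
  | fuel, groups, idx, row =>
    if idx < xs.length then
      match fuel with
      | 0 => groups
      | f + 1 =>
        let order := if PySem.Int.mod row 2 = 0 then PySem.List.pyRange 0 n 1
                     else PySem.List.pyRange (n - 1) (-1) (-1)
        let st := order.foldl (pvAStep xs) (groups, idx)
        pvAOuter xs n f st.1 st.2 (row + 1)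
    else groups

def snake_assign (reg_ids_ordered : List Int) (num_groups : Int) : List (List Int) :=
  pvAOuter reg_ids_ordered num_groups reg_ids_ordered.length
    (List.replicate num_groups.toNat []) 0 0

-- ===== PORT B =====
-- one step of B's 'for i, x in enumerate(...)' loop
def pvBStep (n : Int) (groups : List (List Int)) (p : Int × Int) : List (List Int) :=
  let row := PySem.Int.floordiv p.1 n
  let pos := PySem.Int.mod p.1 n
  let target := if PySem.Int.mod row 2 = 0 then pos else n - 1 - pos
  groups.set target.toNat ((groups.getD target.toNat []) ++ [p.2])

def snake_assign_alt (reg_ids_ordered : List Int) (num_groups : Int) : List (List Int) :=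
  (PySem.List.enumerate reg_ids_ordered 0).foldl (pvBStep num_groups)
    (List.replicate num_groups.toNat [])

-- ===== PRECONDITION & SPEC =====
-- Pre_ excludes num_groups ≤ 0 with a nonempty list: there A never returns (its inner 'order'
-- is empty, so the while loop spins forever) and B raises ZeroDivisionError / IndexError.
def Pre_snake_assign (reg_ids_ordered : List Int) (num_groups : Int) : Prop :=
  0 < num_groups ∨ reg_ids_ordered = []
instance (reg_ids_ordered : List Int) (num_groups : Int) : Decidable (Pre_snake_assign reg_ids_ordered num_groups) := by unfold Pre_snake_assign; infer_instance

def pvWitness_snake_assign : List Int × Int := ([1, 2, 3, 4, 5], 2)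

def Spec_snake_assign (reg_ids_ordered : List Int) (num_groups : Int) (out : List (List Int)) : Prop := out = snake_assign_alt reg_ids_ordered num_groups
instance (reg_ids_ordered : List Int) (num_groups : Int) (out : List (List Int)) : Decidable (Spec_snake_assign reg_ids_ordered num_groups out) := by unfold Spec_snake_assign; infer_instance

-- ===== CLAIM (what is proved, stated in full; the proofs are below) =====
def Claim_equal_snake_assign : Prop := ∀ (reg_ids_ordered : List Int) (num_groups : Int), Dom_snake_assign reg_ids_ordered num_groups → Pre_snake_assign reg_ids_ordered num_groups → Spec_snake_assign reg_ids_ordered num_groups (snake_assign reg_ids_ordered num_groups)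

-- ===== LEMMAS AND PROOFS =====

-- the serpentine column of the element with 0-based index i, as B computes it (Nat form)
def pvTgt (n' i : Nat) : Nat := if (i / n') % 2 = 0 then i % n' else n' - 1 - i % n'

theorem pvBStep_eq (n' : Nat) (hn : 0 < n') (groups : List (List Int)) (i : Nat) (x : Int) :
    pvBStep ((n' : Nat) : Int) groups (((i : Nat) : Int), x)
      = groups.set (pvTgt n' i) ((groups.getD (pvTgt n' i) []) ++ [x]) := by
  simp only [pvBStep, pvTgt]
  have h2 : ((2 : Nat) : Int) = 2 := by norm_num
  rw [PySem.Int.floordiv_natCast, PySem.Int.mod_natCast, ← h2, PySem.Int.mod_natCast]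
  have hmodlt : i % n' < n' := Nat.mod_lt _ hn
  by_cases hpar : (i / n') % 2 = 0
  · have hc : ((i / n' % 2 : Nat) : Int) = 0 := by exact_mod_cast hpar
    rw [if_pos hc, if_pos hpar, Int.toNat_natCast]
  · have hc : ¬ (((i / n' % 2 : Nat) : Int) = 0) := by exact_mod_cast hpar
    rw [if_neg hc, if_neg hpar]
    have ht : ((n' : Nat) : Int) - 1 - ((i % n' : Nat) : Int) = ((n' - 1 - i % n' : Nat) : Int) := by
      omega
    rw [ht, Int.toNat_natCast]

theorem pv_inner (xs : List Int) (n' : Nat) (hn : 0 < n') :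
    ∀ (ord : List Int) (groups : List (List Int)) (idx : Nat), idx ≤ xs.length →
    (∀ j (hj : j < ord.length), idx + j < xs.length → ord[j] = ((pvTgt n' (idx + j) : Nat) : Int)) →
    ord.foldl (pvAStep xs) (groups, idx)
      = ((((PySem.List.enumerate xs 0).drop idx).take ord.length).foldl (pvBStep ((n' : Nat) : Int)) groups,
         min (idx + ord.length) xs.length) := by
  intro ord
  induction ord with
  | nil =>
    intro groups idx hidx _
    simp [Nat.min_eq_left hidx]
  | cons g ord ih =>
    intro groups idx hidx hord
    by_cases hlt : idx < xs.length
    · have hlen : idx < (PySem.List.enumerate xs 0).length := by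
        rw [PySem.List.length_enumerate]; exact hlt
      have hdrop : (PySem.List.enumerate xs 0).drop idx
          = ((0 : Int) + (idx : Int), xs[idx]) :: (PySem.List.enumerate xs 0).drop (idx + 1) := by
        rw [List.drop_eq_getElem_cons hlen, PySem.List.getElem_enumerate]
      have hg : g = ((pvTgt n' idx : Nat) : Int) := by
        have := hord 0 (by simp) (by omega)
        simpa using this
      have hstep : pvAStep xs (groups, idx) g
          = (groups.set (pvTgt n' idx) ((groups.getD (pvTgt n' idx) []) ++ [xs[idx]]), idx + 1) := by
        unfold pvAStep
        simp [hlt, hg]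
      have hbs : pvBStep ((n' : Nat) : Int) groups ((0 : Int) + (idx : Int), xs[idx])
          = groups.set (pvTgt n' idx) ((groups.getD (pvTgt n' idx) []) ++ [xs[idx]]) := by
        have := pvBStep_eq n' hn groups idx xs[idx]
        simpa using this
      rw [List.foldl_cons, hstep, hdrop]
      rw [List.length_cons, List.take_succ_cons, List.foldl_cons, hbs]
      have ihh := ih (groups.set (pvTgt n' idx) ((groups.getD (pvTgt n' idx) []) ++ [xs[idx]]))
        (idx + 1) (by omega)
        (fun j hj hjl => by
          have := hord (j + 1) (by simpa using Nat.succ_lt_succ hj) (by omega)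
          simpa [Nat.add_assoc, Nat.add_comm 1 j] using this)
      rw [ihh]
      simp only [Prod.mk.injEq]
      exact ⟨by trivial, by omega⟩
    · -- idx = xs.length: every step is a no-op on both sides
      have hid : idx = xs.length := by omega
      have hdropnil : (PySem.List.enumerate xs 0).drop idx = [] := by
        apply List.drop_eq_nil_of_le
        rw [PySem.List.length_enumerate]; omega
      have hstep : pvAStep xs (groups, idx) g = (groups, idx) := by
        unfold pvAStep; simp [hlt]
      rw [List.foldl_cons, hstep]
      have ihh := ih groups idx hidx (fun j hj hjl => by omega)
      rw [ihh, hdropnil]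
      simp; omega

theorem pv_outer (xs : List Int) (n' : Nat) (hn : 0 < n') :
    ∀ (fuel : Nat) (groups : List (List Int)) (idx row : Nat),
    idx ≤ xs.length → (idx = row * n' ∨ idx = xs.length) → xs.length ≤ idx + fuel * n' →
    pvAOuter xs ((n' : Nat) : Int) fuel groups idx ((row : Nat) : Int)
      = ((PySem.List.enumerate xs 0).drop idx).foldl (pvBStep ((n' : Nat) : Int)) groups := by
  intro fuel
  induction fuel with
  | zero =>
    intro groups idx row hidx hinv hfuel
    have hid : idx = xs.length := by omega
    rw [pvAOuter]
    have : ¬ idx < xs.length := by omega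
    rw [if_neg this]
    have : (PySem.List.enumerate xs 0).drop idx = [] := by
      apply List.drop_eq_nil_of_le; rw [PySem.List.length_enumerate]; omega
    rw [this]; rfl
  | succ f ih =>
    intro groups idx row hidx hinv hfuel
    by_cases hlt : idx < xs.length
    · have hrow : idx = row * n' := by
        rcases hinv with h | h
        · exact h
        · omega
      rw [pvAOuter, if_pos hlt]
      have h2 : ((2 : Nat) : Int) = 2 := by norm_num
      have hmodcast : PySem.Int.mod ((row : Nat) : Int) 2 = ((row % 2 : Nat) : Int) := by
        rw [← h2, PySem.Int.mod_natCast]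
      -- characterise the order list of this row
      have horder :
          (if PySem.Int.mod ((row : Nat) : Int) 2 = 0 then PySem.List.pyRange 0 ((n' : Nat) : Int) 1
           else PySem.List.pyRange (((n' : Nat) : Int) - 1) (-1) (-1))
          = (List.range n').map (fun k => if row % 2 = 0 then ((k : Nat) : Int) else ((n' : Nat) : Int) - 1 - (k : Nat)) := by
        rw [hmodcast]
        by_cases hpar : row % 2 = 0
        · have : (((row % 2 : Nat) : Int) = 0) := by exact_mod_cast hpar
          rw [if_pos this]
          rw [PySem.List.pyRange_one]
          simp [hpar]
        · have : ¬ (((row % 2 : Nat) : Int) = 0) := by exact_mod_cast hpar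
          rw [if_neg this]
          rw [PySem.List.pyRange_neg_one]
          have : ((((n' : Nat) : Int) - 1) - (-1)).toNat = n' := by omega
          rw [this]
          simp [hpar]
      set ord := (List.range n').map (fun k => if row % 2 = 0 then ((k : Nat) : Int) else ((n' : Nat) : Int) - 1 - (k : Nat)) with hord_def
      have hordlen : ord.length = n' := by simp [hord_def]
      have hordspec : ∀ j (hj : j < ord.length), idx + j < xs.length → ord[j] = ((pvTgt n' (idx + j) : Nat) : Int) := by
        intro j hj hjl
        have hjn : j < n' := by omega
        have hget : ord[j] = if row % 2 = 0 then ((j : Nat) : Int) else ((n' : Nat) : Int) - 1 - (j : Nat) := by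
          simp [hord_def]
        have hdiv : (idx + j) / n' = row := by
          rw [hrow, Nat.mul_comm]
          rw [Nat.mul_add_div hn]
          simp [Nat.div_eq_of_lt hjn]
        have hmod : (idx + j) % n' = j := by
          rw [hrow, Nat.mul_comm, Nat.mul_add_mod]
          exact Nat.mod_eq_of_lt hjn
        unfold pvTgt
        rw [hdiv, hmod, hget]
        by_cases hpar : row % 2 = 0
        · simp [hpar]
        · simp only [hpar, if_false]
          omega
      have hchunk := pv_inner xs n' hn ord groups idx hidx hordspec
      simp only [horder] at *
      rw [hchunk]
      have hpush : ((row : Nat) : Int) + 1 = (((row + 1 : Nat)) : Int) := by push_cast; ring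
      rw [hordlen, hpush]
      have hidx' : min (idx + n') xs.length ≤ xs.length := by omega
      have hinv' : min (idx + n') xs.length = (row + 1) * n' ∨ min (idx + n') xs.length = xs.length := by
        by_cases hc : idx + n' ≤ xs.length
        · left; rw [Nat.min_eq_left hc, hrow]; ring
        · right; omega
      have hfuel' : xs.length ≤ min (idx + n') xs.length + f * n' := by
        by_cases hc : idx + n' ≤ xs.length
        · rw [Nat.min_eq_left hc]
          have : idx + (f + 1) * n' = idx + n' + f * n' := by ring
          omega
        · omega
      rw [ih _ _ (row + 1) hidx' hinv' hfuel']
      -- split the fold over drop idx into the chunk and the rest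
      have hsplit : (PySem.List.enumerate xs 0).drop idx
          = (((PySem.List.enumerate xs 0).drop idx).take n') ++ ((PySem.List.enumerate xs 0).drop (min (idx + n') xs.length)) := by
        have hdd : ((PySem.List.enumerate xs 0).drop idx).drop n' = (PySem.List.enumerate xs 0).drop (idx + n') := List.drop_drop
        by_cases hc : idx + n' ≤ xs.length
        · rw [Nat.min_eq_left hc]
          conv_lhs => rw [← List.take_append_drop n' ((PySem.List.enumerate xs 0).drop idx)]
          rw [hdd]
        · have hmin : min (idx + n') xs.length = xs.length := by omega
          rw [hmin]
          have h1 : (PySem.List.enumerate xs 0).drop (idx + n') = [] := by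
            apply List.drop_eq_nil_of_le; rw [PySem.List.length_enumerate]; omega
          have h2' : (PySem.List.enumerate xs 0).drop xs.length = [] := by
            apply List.drop_eq_nil_of_le; rw [PySem.List.length_enumerate]
          conv_lhs => rw [← List.take_append_drop n' ((PySem.List.enumerate xs 0).drop idx)]
          rw [hdd, h1, h2']
      conv_rhs => rw [hsplit]
      rw [List.foldl_append]
    · -- loop guard false: idx = xs.length
      rw [pvAOuter, if_neg hlt]
      have : (PySem.List.enumerate xs 0).drop idx = [] := by
        apply List.drop_eq_nil_of_le; rw [PySem.List.length_enumerate]; omega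
      rw [this]; rfl

-- ===== VERDICT (by name: the statement is the Claim_ definition above) =====
theorem snake_assign_spec : Claim_equal_snake_assign := by
  intro xs n _ hpre
  unfold Spec_snake_assign snake_assign snake_assign_alt
  rcases hpre with hn | hnil
  · have hn' : n = ((n.toNat : Nat) : Int) := (Int.toNat_of_nonneg (le_of_lt hn)).symm
    have hpos : 0 < n.toNat := by omega
    have h0 : (0 : Int) = (((0 : Nat)) : Int) := rfl
    rw [hn', h0]
    rw [pv_outer xs n.toNat hpos xs.length (List.replicate (((n.toNat : Nat) : Int)).toNat []) 0 0
      (by omega) (by left; omega) (by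
        rcases Nat.eq_zero_or_pos xs.length with h | h
        · omega
        · calc xs.length ≤ xs.length * n.toNat := Nat.le_mul_of_pos_right _ hpos
            _ = 0 + xs.length * n.toNat := by omega)]
    simp
  · subst hnil
    simp [pvAOuter.eq_def, PySem.List.enumerate]
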